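-- pv_equiv track=rewrite | github.com/croyla/kia-live-serverside | old_src/shared/predict_times.py | _unwrap_trip_minutes
-- ===== SOURCE A (Python) =====
-- from typing import Any, Dict, List, Optional, Tuple, Union
--
-- def _unwrap_trip_minutes(times_min: List[int]) -> List[int]:
--     """Unwrap times that may cross midnight so sequence is nondecreasing in minutes."""
--     unwrapped, offset, prev = [], 0, None
--     for t in times_min:
--         if prev is not None and t + offset < prev:
--             offset += 1440
--         val = t + offset
--         unwrapped.append(val)
--         prev = val
--     return unwrapped
-- ===== SOURCE B (Python) =====
-- from typing import List
--
-- def _unwrap_trip_minutes(times_min: List[int]) -> List[int]: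
--     """Unwrap times that may cross midnight so sequence is nondecreasing in minutes."""
--     # Split into maximal nondecreasing runs; the k-th run is a day-k segment,
--     # so every element of run k is shifted by k whole days (1440*k minutes).
--     runs = []
--     rest = times_min
--     while rest:
--         i = 1
--         while i < len(rest) and rest[i] >= rest[i - 1]:
--             i += 1
--         runs.append(rest[:i])
--         rest = rest[i:]
--     return [t + 1440 * k for k, run in enumerate(runs) for t in run]
-- ===== Notes on version B (the rewrite author's own statement) =====
-- stated objective: alternative
-- what changed: Replaces the stateful offset/prev accumulator loop by a segmentation algorithm: slice the list into maximal nondecreasing runs, then flatten with enumerate, shifting every element of the k-th run by 1440*k.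
import Mathlib
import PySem

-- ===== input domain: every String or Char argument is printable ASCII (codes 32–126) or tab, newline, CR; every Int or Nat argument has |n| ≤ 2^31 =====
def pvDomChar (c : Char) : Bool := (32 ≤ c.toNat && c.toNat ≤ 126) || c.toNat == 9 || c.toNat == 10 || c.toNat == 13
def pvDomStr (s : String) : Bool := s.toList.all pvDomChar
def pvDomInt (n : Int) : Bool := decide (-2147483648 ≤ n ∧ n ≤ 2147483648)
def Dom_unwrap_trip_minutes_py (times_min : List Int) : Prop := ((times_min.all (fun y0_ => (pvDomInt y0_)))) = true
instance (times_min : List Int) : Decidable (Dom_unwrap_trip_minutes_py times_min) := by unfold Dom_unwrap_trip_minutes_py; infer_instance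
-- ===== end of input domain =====

-- B replaces the stateful offset loop by segmentation into maximal nondecreasing runs, flattened with a 1440*k shift per run (objective: alternative).


-- ===== PORT A =====
-- A's loop, state = (offset, prev); appending to `unwrapped` becomes consing the value onto the recursive result.
def pvALoop (ts : List Int) (offset : Int) (prev : Option Int) : List Int :=
  match ts with
  | [] => []
  | t :: rest =>
      let offset' := match prev with
        | some p => if t + offset < p then offset + 1440 else offset
        | none => offset
      let val := t + offset'
      val :: pvALoop rest offset' (some val)

def unwrap_trip_minutes_py (times_min : List Int) : List Int :=
  pvALoop times_min 0 none

-- ===== PORT B =====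
-- inner while: length of the maximal nondecreasing prefix starting at index 1, given the previous value
def pvRun (ts : List Int) (p : Int) : List Int × List Int :=
  match ts with
  | [] => ([], [])
  | t :: rest =>
      if p ≤ t then
        let r := pvRun rest t
        (t :: r.1, r.2)
      else ([], t :: rest)

theorem pvRun_len (ts : List Int) (p : Int) : (pvRun ts p).2.length ≤ ts.length := by
  induction ts generalizing p with
  | nil => simp [pvRun]
  | cons t rest ih =>
      simp only [pvRun]
      split
      · exact le_trans (ih t) (Nat.le_succ _)
      · simp

-- outer while: split into maximal nondecreasing runs
def pvRuns (ts : List Int) : List (List Int) :=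
  match h : ts with
  | [] => []
  | t :: rest =>
      (t :: (pvRun rest t).1) :: pvRuns (pvRun rest t).2
termination_by ts.length
decreasing_by
  subst h
  have := pvRun_len rest t
  simp only [List.length_cons]
  omega

def unwrap_trip_minutes_py_alt (times_min : List Int) : List Int :=
  (PySem.List.enumerate (pvRuns times_min)).flatMap
    (fun kr => kr.2.map (fun t => t + 1440 * kr.1))

-- ===== PRECONDITION & SPEC =====
def Spec_unwrap_trip_minutes_py (times_min : List Int) (out : List Int) : Prop := out = unwrap_trip_minutes_py_alt times_min
instance (times_min : List Int) (out : List Int) : Decidable (Spec_unwrap_trip_minutes_py times_min out) := by unfold Spec_unwrap_trip_minutes_py; infer_instance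

-- ===== CLAIM (what is proved, stated in full; the proofs are below) =====
def Claim_equal_unwrap_trip_minutes_py : Prop := ∀ (times_min : List Int), Dom_unwrap_trip_minutes_py times_min → Spec_unwrap_trip_minutes_py times_min (unwrap_trip_minutes_py times_min)

-- ===== LEMMAS AND PROOFS =====
-- flatten of runs with a starting offset (proof-side view of B's enumerate/flatMap)
def pvFlatOff (off : Int) : List (List Int) → List Int
  | [] => []
  | r :: rs => r.map (· + off) ++ pvFlatOff (off + 1440) rs

theorem pvFlat_eq (rs : List (List Int)) : ∀ (s : Int),
    (PySem.List.enumerate rs s).flatMap (fun kr => kr.2.map (fun t => t + 1440 * kr.1))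
      = pvFlatOff (1440 * s) rs := by
  intro s
  induction rs generalizing s with
  | nil => simp [PySem.List.enumerate_nil, pvFlatOff]
  | cons r rs ih =>
      rw [PySem.List.enumerate_cons, List.flatMap_cons]
      simp only [pvFlatOff]
      have := ih (s + 1)
      rw [show (1440 : Int) * (s + 1) = 1440 * s + 1440 by ring] at this
      rw [this]

-- head of the leftover is a strict descent from the last of the run
theorem pvRun_desc (ts : List Int) (p : Int) :
    ∀ t r, (pvRun ts p).2 = t :: r → t < (p :: (pvRun ts p).1).getLast (by simp) := by
  induction ts generalizing p with
  | nil => intro t r h; simp [pvRun] at h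
  | cons a rest ih =>
      intro t r h
      by_cases hp : p ≤ a
      · simp only [pvRun, if_pos hp] at h ⊢
        have := ih a t r h
        rwa [List.getLast_cons_cons]
      · simp only [pvRun, if_neg hp] at h ⊢
        obtain ⟨h1, h2⟩ := List.cons.inj h
        subst h1
        simp only [List.getLast_singleton]
        omega

-- A's loop consumes exactly one run without bumping the offset
theorem pvL1 (ts : List Int) (p off : Int) :
    pvALoop ts off (some (p + off)) =
      (pvRun ts p).1.map (· + off) ++
        pvALoop (pvRun ts p).2 off (some ((p :: (pvRun ts p).1).getLast (by simp) + off)) := by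
  induction ts generalizing p off with
  | nil => simp [pvRun, pvALoop]
  | cons t rest ih =>
      by_cases hp : p ≤ t
      · have hlt : ¬ t + off < p + off := by omega
        simp only [pvRun, if_pos hp, pvALoop, hlt, if_false, List.map_cons, List.cons_append,
          List.getLast_cons_cons, List.cons.injEq]
        exact ⟨trivial, ih t off⟩
      · have hlt : t < p := by omega
        simp only [pvRun, if_neg hp, List.map_nil, List.nil_append, List.getLast_singleton]

-- at a descent boundary, A's loop equals the flattened runs with the offset bumped once
theorem pvM (ts : List Int) (p off : Int)
    (hb : ∀ t r, ts = t :: r → t < p) :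
    pvALoop ts off (some (p + off)) = pvFlatOff (off + 1440) (pvRuns ts) := by
  match ts with
  | [] => simp [pvALoop, pvRuns, pvFlatOff]
  | t :: rest =>
      have ht : t < p := hb t rest rfl
      have hlt : t + off < p + off := by omega
      rw [pvALoop]
      simp only [if_pos hlt]
      rw [show t + (off + 1440) = t + (off + 1440) from rfl]
      have h1 := pvL1 rest t (off + 1440)
      rw [show (t : Int) + (off + 1440) = t + (off + 1440) from rfl]
      rw [h1]
      have hrec : pvALoop (pvRun rest t).2 (off + 1440)
          (some ((t :: (pvRun rest t).1).getLast (by simp) + (off + 1440)))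
          = pvFlatOff (off + 1440 + 1440) (pvRuns (pvRun rest t).2) := by
        exact pvM (pvRun rest t).2 ((t :: (pvRun rest t).1).getLast (by simp)) (off + 1440)
          (fun u r h => pvRun_desc rest t u r h)
      rw [hrec]
      rw [pvRuns]
      simp only [pvFlatOff, List.map_cons, List.cons_append]
termination_by ts.length
decreasing_by
  have := pvRun_len rest t
  simp only [List.length_cons]
  omega

-- ===== VERDICT (by name: the statement is the Claim_ definition above) =====
theorem unwrap_trip_minutes_py_spec : Claim_equal_unwrap_trip_minutes_py := by
  intro ts _
  unfold Spec_unwrap_trip_minutes_py unwrap_trip_minutes_py unwrap_trip_minutes_py_alt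
  rw [pvFlat_eq (pvRuns ts) 0]
  match ts with
  | [] => simp [pvALoop, pvRuns, pvFlatOff]
  | t :: rest =>
      simp only [pvALoop]
      have h1 := pvL1 rest t 0
      rw [show (t : Int) + 0 = t + 0 from rfl] at h1
      rw [show pvALoop rest 0 (some (t + 0)) = pvALoop rest 0 (some (t + 0)) from rfl]
      rw [h1]
      have hrec := pvM (pvRun rest t).2 ((t :: (pvRun rest t).1).getLast (by simp)) 0
        (fun u r h => pvRun_desc rest t u r h)
      rw [hrec, pvRuns]
      simp only [pvFlatOff, List.map_cons, List.cons_append]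
      norm_num
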